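-- pv_equiv track=rewrite | github.com/madhavgera2022-a11y/quantum-maze-solver | final.py | find_all_simple_paths
-- ===== SOURCE A (Python) =====
-- def find_all_simple_paths(layout, start, end):
--     """Finds all simple (no-cycle) paths from start to end using DFS."""
--     rows, cols = len(layout), len(layout[0])
--     paths, stack = [], [(start, [start])]
--     while stack:
--         (r, c), path = stack.pop()
--         if (r, c) == end:
--             paths.append(path)
--             continue
--         for dr, dc in [(1, 0), (0, 1), (-1, 0), (0, -1)]:
--             nr, nc = r + dr, c + dc
--             # Check bounds AND not in path
--             if 0 <= nr < rows and 0 <= nc < cols and (nr, nc) not in path: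
--                 stack.append(((nr, nc), path + [(nr, nc)]))
--     return paths
-- ===== SOURCE B (Python) =====
-- def find_all_simple_paths(layout, start, end):
--     """All simple (no-cycle) paths from start to end, by recursive backtracking DFS.
--
--     Iterates the four directions in reverse of the stack version's order, so the
--     paths come out in the same order as the LIFO-stack enumeration.
--     """
--     rows, cols = len(layout), len(layout[0])
--     results = []
--
--     def dfs(pos, path):
--         if pos == end:
--             results.append(path)
--             return
--         r, c = pos
--         for dr, dc in [(0, -1), (-1, 0), (0, 1), (1, 0)]:
--             nr, nc = r + dr, c + dc
--             if 0 <= nr < rows and 0 <= nc < cols and (nr, nc) not in path: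
--                 dfs((nr, nc), path + [(nr, nc)])
--
--     dfs(start, [start])
--     return results
-- ===== Notes on version B (the rewrite author's own statement) =====
-- stated objective: alternative
-- what changed: Replaces A's explicit LIFO work-list loop with a recursive backtracking DFS helper that iterates the four directions in reverse order, yielding the identical path list in the same order.
import Mathlib
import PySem

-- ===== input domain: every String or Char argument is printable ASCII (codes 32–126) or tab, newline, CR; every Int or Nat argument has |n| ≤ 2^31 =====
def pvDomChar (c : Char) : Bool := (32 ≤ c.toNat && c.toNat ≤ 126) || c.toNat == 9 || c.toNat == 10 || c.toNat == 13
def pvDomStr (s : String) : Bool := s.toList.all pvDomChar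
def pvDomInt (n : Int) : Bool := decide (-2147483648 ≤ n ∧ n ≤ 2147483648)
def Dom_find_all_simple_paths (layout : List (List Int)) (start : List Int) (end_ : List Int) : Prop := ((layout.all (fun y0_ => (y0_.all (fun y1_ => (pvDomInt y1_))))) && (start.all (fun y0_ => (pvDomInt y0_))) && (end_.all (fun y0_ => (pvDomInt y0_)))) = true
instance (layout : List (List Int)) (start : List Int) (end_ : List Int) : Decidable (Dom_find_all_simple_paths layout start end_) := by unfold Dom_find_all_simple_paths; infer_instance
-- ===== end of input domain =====

-- B replaces A's explicit LIFO work-list with a recursive backtracking DFS iterating the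
-- directions in reverse order (objective: alternative decomposition, same result order).

-- ===== PORT A =====
-- termination weight: number of in-grid cells not yet on the path
def pvGridW (rows cols : Int) (path : List (List Int)) : Nat :=
  (((Finset.range rows.toNat) ×ˢ (Finset.range cols.toNat)).filter
    (fun ij => ([(ij.1 : Int), (ij.2 : Int)] : List Int) ∉ path)).card

def pvDirsA : List (Int × Int) := [(1, 0), (0, 1), (-1, 0), (0, -1)]

-- the body of A's inner `for` loop: conditionally push a neighbour onto the stack
def pvPushA (rows cols r c : Int) (path : List (List Int))
    (st : List ((Int × Int) × List (List Int))) (d : Int × Int) :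
    List ((Int × Int) × List (List Int)) :=
  if 0 ≤ r + d.1 ∧ r + d.1 < rows ∧ 0 ≤ c + d.2 ∧ c + d.2 < cols ∧
      ([r + d.1, c + d.2] : List Int) ∉ path then
    ((r + d.1, c + d.2), path ++ [[r + d.1, c + d.2]]) :: st
  else st

def pvStackW (rows cols : Int) (st : List ((Int × Int) × List (List Int))) : Nat :=
  (st.map (fun it => 5 ^ pvGridW rows cols it.2)).sum

theorem pvGridW_push_lt (rows cols nr nc : Int) (path : List (List Int))
    (h1 : 0 ≤ nr) (h2 : nr < rows) (h3 : 0 ≤ nc) (h4 : nc < cols)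
    (h5 : ([nr, nc] : List Int) ∉ path) :
    pvGridW rows cols (path ++ [[nr, nc]]) < pvGridW rows cols path := by
  have hq : ([((nr.toNat : Int)), ((nc.toNat : Int))] : List Int) = [nr, nc] := by
    simp [Int.toNat_of_nonneg h1, Int.toNat_of_nonneg h3]
  have hqmem : (nr.toNat, nc.toNat) ∈ ((Finset.range rows.toNat) ×ˢ (Finset.range cols.toNat)).filter
      (fun ij => ([(ij.1 : Int), (ij.2 : Int)] : List Int) ∉ path) := by
    simp only [Finset.mem_filter, Finset.mem_product, Finset.mem_range]
    exact ⟨⟨by omega, by omega⟩, by rw [hq]; exact h5⟩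
  have hsub : ((Finset.range rows.toNat) ×ˢ (Finset.range cols.toNat)).filter
        (fun ij => ([(ij.1 : Int), (ij.2 : Int)] : List Int) ∉ path ++ [[nr, nc]])
      ⊆ (((Finset.range rows.toNat) ×ˢ (Finset.range cols.toNat)).filter
        (fun ij => ([(ij.1 : Int), (ij.2 : Int)] : List Int) ∉ path)).erase (nr.toNat, nc.toNat) := by
    intro ij hij
    simp only [Finset.mem_filter, List.mem_append, List.mem_singleton] at hij
    rcases hij with ⟨hmem, hnot⟩
    push Not at hnot
    refine Finset.mem_erase.mpr ⟨?_, Finset.mem_filter.mpr ⟨hmem, hnot.1⟩⟩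
    intro hcontra
    apply hnot.2
    rw [hcontra]
    exact hq
  calc _ ≤ _ := Finset.card_le_card hsub
    _ < _ := Finset.card_erase_lt_of_mem hqmem

theorem pvPow5_le_div (a b : Nat) (h : a < b) : 5 ^ a ≤ 5 ^ b / 5 := by
  have hb : b = (b - 1) + 1 := by omega
  have h5 : 5 ^ b = 5 ^ (b - 1) * 5 := by conv_lhs => rw [hb, pow_succ]
  rw [h5, Nat.mul_div_cancel _ (by norm_num)]
  exact Nat.pow_le_pow_right (by norm_num) (by omega)

theorem pvStackW_foldl_le (rows cols r c : Int) (path : List (List Int)) :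
    ∀ (dirs : List (Int × Int)) (rest : List ((Int × Int) × List (List Int))),
      pvStackW rows cols (dirs.foldl (pvPushA rows cols r c path) rest)
        ≤ pvStackW rows cols rest + dirs.length * (5 ^ pvGridW rows cols path / 5) := by
  intro dirs
  induction dirs with
  | nil => intro rest; simp
  | cons d ds ih =>
    intro rest
    have hstep : pvStackW rows cols (pvPushA rows cols r c path rest d)
        ≤ pvStackW rows cols rest + 5 ^ pvGridW rows cols path / 5 := by
      unfold pvPushA
      split_ifs with hcond
      · obtain ⟨c1, c2, c3, c4, c5⟩ := hcond
        have hlt := pvGridW_push_lt rows cols (r + d.1) (c + d.2) path c1 c2 c3 c4 c5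
        have hle := pvPow5_le_div _ _ hlt
        simp only [pvStackW, List.map_cons, List.sum_cons]
        omega
      · exact Nat.le_add_right _ _
    calc pvStackW rows cols ((d :: ds).foldl (pvPushA rows cols r c path) rest)
        = pvStackW rows cols (ds.foldl (pvPushA rows cols r c path) (pvPushA rows cols r c path rest d)) := by
          simp [List.foldl_cons]
      _ ≤ pvStackW rows cols (pvPushA rows cols r c path rest d) + ds.length * (5 ^ pvGridW rows cols path / 5) := ih _
      _ ≤ pvStackW rows cols rest + (d :: ds).length * (5 ^ pvGridW rows cols path / 5) := by
          simp only [List.length_cons]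
          have := hstep
          nlinarith [hstep]

theorem pvStackW_dec (rows cols : Int) (path : List (List Int))
    (rc : Int × Int) (rest : List ((Int × Int) × List (List Int))) :
    pvStackW rows cols (pvDirsA.foldl (pvPushA rows cols rc.1 rc.2 path) rest)
      < pvStackW rows cols ((rc, path) :: rest) := by
  have h := pvStackW_foldl_le rows cols rc.1 rc.2 path pvDirsA rest
  have hlen : pvDirsA.length = 4 := by decide
  rw [hlen] at h
  have h5 : 4 * (5 ^ pvGridW rows cols path / 5) < 5 ^ pvGridW rows cols path := by
    rcases Nat.eq_zero_or_pos (pvGridW rows cols path) with h0 | h0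
    · simp [h0]
    · have he : 5 ^ pvGridW rows cols path = 5 ^ (pvGridW rows cols path - 1) * 5 := by
        rw [← pow_succ]; congr 1; omega
      have hpos : 0 < 5 ^ (pvGridW rows cols path - 1) := pow_pos (by norm_num : (0:ℕ) < 5) _
      rw [he, Nat.mul_div_cancel _ (by norm_num)]
      omega
  simp only [pvStackW, List.map_cons, List.sum_cons] at *
  omega

-- A's while loop: stack items are ((r, c), path), head of the list = top of the stack
def pvLoopA (rows cols : Int) (end_ : List Int) :
    List ((Int × Int) × List (List Int)) → List (List (List Int)) → List (List (List Int))
  | [], paths => paths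
  | (rc, path) :: rest, paths =>
    if [rc.1, rc.2] = end_ then
      pvLoopA rows cols end_ rest (paths ++ [path])
    else
      pvLoopA rows cols end_ (pvDirsA.foldl (pvPushA rows cols rc.1 rc.2 path) rest) paths
  termination_by st _ => pvStackW rows cols st
  decreasing_by
  · have : 0 < 5 ^ pvGridW rows cols path := pow_pos (by norm_num : (0:ℕ) < 5) _
    simp only [pvStackW, List.map_cons, List.sum_cons]
    omega
  · exact pvStackW_dec rows cols path rc rest

def find_all_simple_paths (layout : List (List Int)) (start : List Int) (end_ : List Int) :
    List (List (List Int)) :=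
  match layout with
  | [] => []            -- Python raises IndexError on layout[0]; outside Pre_
  | row0 :: _ =>
    match start with
    | [r, c] => pvLoopA (layout.length : Int) (row0.length : Int) end_ [((r, c), [start])] []
    | _ => []           -- Python raises ValueError unpacking start; outside Pre_

-- ===== PORT B =====
def pvDirsB : List (Int × Int) := [(0, -1), (-1, 0), (0, 1), (1, 0)]

mutual
-- Source B's recursive dfs; pvGo is its `for dr, dc in [...]` loop, results concatenated in order
def pvDfs (rows cols : Int) (end_ : List Int) (rc : Int × Int) (path : List (List Int)) :
    List (List (List Int)) :=
  if [rc.1, rc.2] = end_ then [path]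
  else pvGo rows cols end_ rc path pvDirsB
  termination_by (pvGridW rows cols path, 5)
  decreasing_by exact Prod.Lex.right _ (by decide)

def pvGo (rows cols : Int) (end_ : List Int) (rc : Int × Int) (path : List (List Int)) :
    List (Int × Int) → List (List (List Int))
  | [] => []
  | d :: ds =>
    (if h : 0 ≤ rc.1 + d.1 ∧ rc.1 + d.1 < rows ∧ 0 ≤ rc.2 + d.2 ∧ rc.2 + d.2 < cols ∧
          ([rc.1 + d.1, rc.2 + d.2] : List Int) ∉ path then
        pvDfs rows cols end_ (rc.1 + d.1, rc.2 + d.2) (path ++ [[rc.1 + d.1, rc.2 + d.2]])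
      else []) ++ pvGo rows cols end_ rc path ds
  termination_by ds => (pvGridW rows cols path, ds.length)
  decreasing_by
  · exact Prod.Lex.left _ _ (pvGridW_push_lt rows cols _ _ path h.1 h.2.1 h.2.2.1 h.2.2.2.1 h.2.2.2.2)
  · refine Prod.Lex.right _ ?_
    simp
end

def find_all_simple_paths_alt (layout : List (List Int)) (start : List Int) (end_ : List Int) :
    List (List (List Int)) :=
  match layout with
  | [] => []            -- Python raises IndexError on layout[0]
  | row0 :: _ =>
    if start = end_ then [[start]]     -- dfs's `pos == end` check fires before unpacking pos
    else
      match start with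
      | [] => []        -- Python raises ValueError unpacking pos; outside Pre_
      | [_] => []       -- Python raises ValueError unpacking pos; outside Pre_
      | [r, c] => pvGo (layout.length : Int) (row0.length : Int) end_ (r, c) [start] pvDirsB
      | _ :: _ :: _ :: _ => []  -- Python raises ValueError unpacking pos; outside Pre_

-- ===== PRECONDITION & SPEC =====
-- Pre_ excludes exactly the inputs where Python A raises: empty layout (IndexError on
-- layout[0]) and a start that is not a pair (ValueError unpacking it).
def Pre_find_all_simple_paths (layout : List (List Int)) (start : List Int) (end_ : List Int) : Prop :=
  layout ≠ [] ∧ start.length = 2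
instance (layout : List (List Int)) (start : List Int) (end_ : List Int) : Decidable (Pre_find_all_simple_paths layout start end_) := by unfold Pre_find_all_simple_paths; infer_instance

def pvWitness_find_all_simple_paths : List (List Int) × List Int × List Int :=
  ([[0, 1], [1, 0]], [0, 0], [1, 1])

def Spec_find_all_simple_paths (layout : List (List Int)) (start : List Int) (end_ : List Int) (out : List (List (List Int))) : Prop := out = find_all_simple_paths_alt layout start end_
instance (layout : List (List Int)) (start : List Int) (end_ : List Int) (out : List (List (List Int))) : Decidable (Spec_find_all_simple_paths layout start end_ out) := by unfold Spec_find_all_simple_paths; infer_instance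

-- ===== CLAIM (what is proved, stated in full; the proofs are below) =====
def Claim_equal_find_all_simple_paths : Prop := ∀ (layout : List (List Int)) (start : List Int) (end_ : List Int), Dom_find_all_simple_paths layout start end_ → Pre_find_all_simple_paths layout start end_ → Spec_find_all_simple_paths layout start end_ (find_all_simple_paths layout start end_)

-- ===== LEMMAS AND PROOFS =====
theorem pvDfs_eq (rows cols : Int) (end_ : List Int) (rc : Int × Int) (path : List (List Int)) :
    pvDfs rows cols end_ rc path
      = if [rc.1, rc.2] = end_ then [path] else pvGo rows cols end_ rc path pvDirsB := by
  rw [pvDfs.eq_def]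

theorem pvGo_nil (rows cols : Int) (end_ : List Int) (rc : Int × Int) (path : List (List Int)) :
    pvGo rows cols end_ rc path [] = [] := by
  rw [pvGo.eq_def]

theorem pvGo_cons (rows cols : Int) (end_ : List Int) (rc : Int × Int) (path : List (List Int))
    (d : Int × Int) (ds : List (Int × Int)) :
    pvGo rows cols end_ rc path (d :: ds)
      = (if 0 ≤ rc.1 + d.1 ∧ rc.1 + d.1 < rows ∧ 0 ≤ rc.2 + d.2 ∧ rc.2 + d.2 < cols ∧
            ([rc.1 + d.1, rc.2 + d.2] : List Int) ∉ path then
          pvDfs rows cols end_ (rc.1 + d.1, rc.2 + d.2) (path ++ [[rc.1 + d.1, rc.2 + d.2]])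
        else []) ++ pvGo rows cols end_ rc path ds := by
  rw [pvGo.eq_def]
  simp

theorem pvGo_append (rows cols : Int) (end_ : List Int) (rc : Int × Int) (path : List (List Int))
    (l1 l2 : List (Int × Int)) :
    pvGo rows cols end_ rc path (l1 ++ l2)
      = pvGo rows cols end_ rc path l1 ++ pvGo rows cols end_ rc path l2 := by
  induction l1 with
  | nil => simp [pvGo_nil]
  | cons d ds ih => rw [List.cons_append, pvGo_cons, pvGo_cons, ih, List.append_assoc]

theorem pvFlatMap_foldl_push (rows cols : Int) (end_ : List Int) (r c : Int)
    (path : List (List Int)) :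
    ∀ (dirs : List (Int × Int)) (rest : List ((Int × Int) × List (List Int))),
      (dirs.foldl (pvPushA rows cols r c path) rest).flatMap
          (fun it => pvDfs rows cols end_ it.1 it.2)
        = pvGo rows cols end_ (r, c) path dirs.reverse
          ++ rest.flatMap (fun it => pvDfs rows cols end_ it.1 it.2) := by
  intro dirs
  induction dirs with
  | nil => intro rest; rw [List.reverse_nil, pvGo_nil]; simp
  | cons d ds ih =>
    intro rest
    simp only [List.foldl_cons, List.reverse_cons]
    rw [ih, pvGo_append]
    have hpush : (pvPushA rows cols r c path rest d).flatMap
        (fun it => pvDfs rows cols end_ it.1 it.2)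
        = pvGo rows cols end_ (r, c) path [d]
          ++ rest.flatMap (fun it => pvDfs rows cols end_ it.1 it.2) := by
      rw [pvGo_cons, pvGo_nil]
      unfold pvPushA
      split_ifs with hcond
      · simp
      · simp
    rw [hpush, List.append_assoc]

theorem pvLoopA_eq (rows cols : Int) (end_ : List Int) :
    ∀ (st : List ((Int × Int) × List (List Int))) (paths : List (List (List Int))),
      pvLoopA rows cols end_ st paths
        = paths ++ st.flatMap (fun it => pvDfs rows cols end_ it.1 it.2) := by
  intro st paths
  induction st, paths using pvLoopA.induct rows cols end_ with
  | case1 paths => simp [pvLoopA]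
  | case2 rc path rest paths hend ih =>
    rw [pvLoopA]
    simp only [hend, if_true]
    rw [ih]
    simp [pvDfs_eq, hend]
  | case3 rc path rest paths hend ih =>
    rw [pvLoopA]
    simp only [hend, if_false]
    rw [ih, pvFlatMap_foldl_push]
    have hrev : pvDirsA.reverse = pvDirsB := by decide
    simp [hrev, pvDfs_eq, hend]

-- ===== VERDICT (by name: the statement is the Claim_ definition above) =====
theorem find_all_simple_paths_spec : Claim_equal_find_all_simple_paths := by
  intro layout start end_ _ hpre
  unfold Spec_find_all_simple_paths
  obtain ⟨hne, hlen⟩ := hpre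
  match layout, start with
  | [], _ => exact absurd rfl hne
  | row0 :: lrest, [r, c] =>
    simp only [find_all_simple_paths, find_all_simple_paths_alt]
    rw [pvLoopA_eq]
    simp only [List.flatMap_cons, List.flatMap_nil, List.append_nil, List.nil_append]
    rw [pvDfs_eq]
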